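-- pv_equiv track=rewrite | github.com/anebz/thesis | minimal_learn_bpe.py | get_pair_statistics
-- ===== SOURCE A (Python) =====
-- from collections import defaultdict, Counter
--
-- def get_pair_statistics(vocab):
--     """
--     Count frequency of all symbol pairs, and create index
--     """
--
--     # data structure of pair frequencies
--     stats = defaultdict(int)
--
--     #index from pairs to words
--     indices = defaultdict(lambda: defaultdict(int))
--
--     for i, (word, freq) in enumerate(vocab):
--         prev_char = word[0]
--         for char in word[1:]:
--             stats[prev_char, char] += freq
--             # dict of dict. first key is tuple of bigram,
--             # second key is the index where it's found, last value is the frequency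
--             # the only option where freq might be >1 is if the same bigram is repeated many times in the same index
--             # which is highly unlikely
--             indices[prev_char, char][i] += 1
--             prev_char = char
--
--     return stats, indices
-- ===== SOURCE B (Python) =====
-- from collections import defaultdict
--
-- def get_pair_statistics(vocab):
--     """
--     Count frequency of all symbol pairs, and create index
--     (two-pass: build the index first, then aggregate it into pair frequencies)
--     """
--     # pass 1: index from pairs to words, plus each word's frequency keyed by its position
--     indices = defaultdict(lambda: defaultdict(int))
--     freqs = {}
--     for i, (word, freq) in enumerate(vocab):
--         freqs[i] = freq
--         prev_char = word[0]
--         for char in word[1:]: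
--             indices[prev_char, char][i] += 1
--             prev_char = char
--
--     # pass 2: aggregate the index into pair frequencies
--     stats = defaultdict(int)
--     for pair, sub in indices.items():
--         stats[pair] = sum(count * freqs[i] for i, count in sub.items())
--
--     return stats, indices
-- ===== Notes on version B (the rewrite author's own statement) =====
-- stated objective: alternative
-- what changed: B splits A's single combined scan into two passes: the first builds only the pair->word index plus a word-frequency table keyed by position, and the second computes the pair statistics by aggregating the index (sum of count * word frequency), instead of incrementing stats inside the scan.
import Mathlib
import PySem

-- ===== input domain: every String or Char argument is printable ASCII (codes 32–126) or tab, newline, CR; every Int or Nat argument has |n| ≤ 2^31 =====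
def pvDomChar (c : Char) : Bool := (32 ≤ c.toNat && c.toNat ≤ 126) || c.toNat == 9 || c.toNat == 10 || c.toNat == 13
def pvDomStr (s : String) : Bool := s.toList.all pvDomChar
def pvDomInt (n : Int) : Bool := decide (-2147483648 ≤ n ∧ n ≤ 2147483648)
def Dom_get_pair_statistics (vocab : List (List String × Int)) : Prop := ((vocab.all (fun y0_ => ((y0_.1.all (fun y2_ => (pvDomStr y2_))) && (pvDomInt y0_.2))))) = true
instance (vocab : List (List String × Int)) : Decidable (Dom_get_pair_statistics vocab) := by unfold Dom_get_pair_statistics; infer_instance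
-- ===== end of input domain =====

-- B replaces A's single combined scan by two passes: first build only the pair->word index plus a
-- word-frequency table, then aggregate the index into the pair statistics (objective: alternative
-- decomposition, same cost). Pre_ excludes vocab entries with an empty word, on which A (word[0])
-- raises IndexError.

-- ===== PORT A =====
-- inner loop body: stats[prev_char, char] += freq; indices[prev_char, char][i] += 1; prev_char = char
def pvAinner (i freq : Int)
    (acc : (PySem.Dict (List String) Int × PySem.Dict (List String) (PySem.Dict Int Int)) × String)
    (c : String) :
    (PySem.Dict (List String) Int × PySem.Dict (List String) (PySem.Dict Int Int)) × String :=
  ((acc.1.1.modify [acc.2, c] 0 (· + freq),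
    acc.1.2.modify [acc.2, c] PySem.Dict.empty (fun sub => sub.modify i 0 (· + 1))), c)

-- one iteration of "for i, (word, freq) in enumerate(vocab)"
def pvAword (st : PySem.Dict (List String) Int × PySem.Dict (List String) (PySem.Dict Int Int))
    (iw : Int × (List String × Int)) :
    PySem.Dict (List String) Int × PySem.Dict (List String) (PySem.Dict Int Int) :=
  match iw.2.1 with
  | [] => st            -- word[0] raises IndexError in Python; excluded by Pre_
  | w0 :: rest => (rest.foldl (pvAinner iw.1 iw.2.2) (st, w0)).1

def get_pair_statistics (vocab : List (List String × Int)) :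
    (List (List String × Int)) × (List (List String × List (Int × Int))) :=
  let st := (PySem.List.enumerate vocab).foldl pvAword (PySem.Dict.empty, PySem.Dict.empty)
  (st.1.items, st.2.items.map (fun q => (q.1, q.2.items)))

-- ===== PORT B =====
-- pass-1 inner loop body: indices[prev_char, char][i] += 1; prev_char = char
def pvBinner (i : Int) (acc : PySem.Dict (List String) (PySem.Dict Int Int) × String) (c : String) :
    PySem.Dict (List String) (PySem.Dict Int Int) × String :=
  (acc.1.modify [acc.2, c] PySem.Dict.empty (fun sub => sub.modify i 0 (· + 1)), c)

-- one iteration of pass 1: freqs[i] = freq, then scan the word's bigrams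
def pvBword (st : PySem.Dict (List String) (PySem.Dict Int Int) × PySem.Dict Int Int)
    (iw : Int × (List String × Int)) :
    PySem.Dict (List String) (PySem.Dict Int Int) × PySem.Dict Int Int :=
  let freqs := st.2.insert iw.1 iw.2.2
  match iw.2.1 with
  | [] => (st.1, freqs)  -- word[0] raises IndexError in Python; excluded by Pre_
  | w0 :: rest => ((rest.foldl (pvBinner iw.1) (st.1, w0)).1, freqs)

-- sum(count * freqs[i] for i, count in sub.items()); every index in sub was inserted into freqs,
-- so the freqs[i] lookup never raises and getD with default 0 is exact here
def pvBval (F : PySem.Dict Int Int) (sub : PySem.Dict Int Int) : Int :=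
  sub.items.foldl (fun a r => a + r.2 * F.getD r.1 0) 0

-- pass 2: stats[pair] = sum(...) over indices.items()
def pvBagg (F : PySem.Dict Int Int) (d : PySem.Dict (List String) (PySem.Dict Int Int)) :
    PySem.Dict (List String) Int :=
  d.items.foldl (fun s q => s.insert q.1 (pvBval F q.2)) PySem.Dict.empty

def get_pair_statistics_alt (vocab : List (List String × Int)) :
    (List (List String × Int)) × (List (List String × List (Int × Int))) :=
  let st := (PySem.List.enumerate vocab).foldl pvBword (PySem.Dict.empty, PySem.Dict.empty)
  let stats := pvBagg st.2 st.1
  (stats.items, st.1.items.map (fun q => (q.1, q.2.items)))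

-- ===== PRECONDITION & SPEC =====
-- Pre_ excludes vocab entries with an empty word: there A's 'word[0]' raises IndexError (B raises too)
def Pre_get_pair_statistics (vocab : List (List String × Int)) : Prop :=
  ∀ p ∈ vocab, p.1 ≠ []
instance (vocab : List (List String × Int)) : Decidable (Pre_get_pair_statistics vocab) := by
  unfold Pre_get_pair_statistics; infer_instance

def pvWitness_get_pair_statistics : (List (List String × Int)) :=
  [(["l", "o", "w"], 5), (["l", "o", "w", "e", "r"], 2), (["l", "o"], 3)]

def Spec_get_pair_statistics (vocab : List (List String × Int))
    (out : (List (List String × Int)) × (List (List String × List (Int × Int)))) : Prop :=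
  out = get_pair_statistics_alt vocab
instance (vocab : List (List String × Int))
    (out : (List (List String × Int)) × (List (List String × List (Int × Int)))) :
    Decidable (Spec_get_pair_statistics vocab out) := by
  unfold Spec_get_pair_statistics; infer_instance

-- ===== CLAIM (what is proved, stated in full; the proofs are below) =====
def Claim_equal_get_pair_statistics : Prop :=
  ∀ (vocab : List (List String × Int)), Dom_get_pair_statistics vocab →
    Pre_get_pair_statistics vocab →
    Spec_get_pair_statistics vocab (get_pair_statistics vocab)

-- ===== LEMMAS AND PROOFS =====

-- invariant of the index dict: unique pair keys, each sub-counter has unique keys all below b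
def pvInv (d : PySem.Dict (List String) (PySem.Dict Int Int)) (b : Int) : Prop :=
  d.keys.Nodup ∧ ∀ ps ∈ d.items, ps.2.keys.Nodup ∧ ∀ q ∈ ps.2.items, q.1 < b

lemma pv_agg_items (F : PySem.Dict Int Int) (d : PySem.Dict (List String) (PySem.Dict Int Int))
    (hn : d.keys.Nodup) :
    (pvBagg F d).items = d.items.map (fun q => (q.1, pvBval F q.2)) := by
  unfold pvBagg
  have h := PySem.Dict.items_foldl_insert_fresh d.items (fun q => q.1) (fun q => pvBval F q.2)
    PySem.Dict.empty (fun a _ => by simp [PySem.Dict.contains_empty]) (by simpa [PySem.Dict.keys] using hn)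
  simpa using h

lemma pv_keys_agg (F : PySem.Dict Int Int) (d : PySem.Dict (List String) (PySem.Dict Int Int))
    (hn : d.keys.Nodup) : (pvBagg F d).keys = d.keys := by
  simp [PySem.Dict.keys, pv_agg_items F d hn, List.map_map, Function.comp]

lemma pv_map_insert {ν μ : Type} (h : ν → μ) (d : PySem.Dict (List String) ν) (p : List String) (v : ν) :
    (PySem.Dict.mk (d.items.map (fun q => (q.1, h q.2)))).insert p (h v)
      = PySem.Dict.mk ((d.insert p v).items.map (fun q => (q.1, h q.2))) := by
  have hc : (PySem.Dict.mk (d.items.map (fun q => (q.1, h q.2)))).contains p = d.contains p := by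
    simp [PySem.Dict.contains, List.any_map, Function.comp_def]
  cases hcd : d.contains p with
  | true =>
      apply PySem.Dict.ext
      rw [PySem.Dict.items_insert_of_contains _ _ (hc.trans hcd),
        PySem.Dict.items_insert_of_contains _ _ hcd]
      simp only [List.map_map]
      apply List.map_congr_left
      intro q _
      by_cases hq : q.1 = p <;> simp [hq]
  | false =>
      apply PySem.Dict.ext
      rw [PySem.Dict.items_insert_of_not_contains _ _ (hc.trans hcd),
        PySem.Dict.items_insert_of_not_contains _ _ hcd]
      simp

lemma pv_agg_insert (F : PySem.Dict Int Int) (d : PySem.Dict (List String) (PySem.Dict Int Int))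
    (p : List String) (v : PySem.Dict Int Int) (hn : d.keys.Nodup) :
    pvBagg F (d.insert p v) = (pvBagg F d).insert p (pvBval F v) := by
  have e2 : pvBagg F d = PySem.Dict.mk (d.items.map (fun q => (q.1, pvBval F q.2))) :=
    PySem.Dict.ext (pv_agg_items F d hn)
  have e1 : pvBagg F (d.insert p v)
      = PySem.Dict.mk ((d.insert p v).items.map (fun q => (q.1, pvBval F q.2))) :=
    PySem.Dict.ext (pv_agg_items F (d.insert p v) (PySem.Dict.nodup_keys_insert d p v hn))
  rw [e1, e2, pv_map_insert]

lemma pv_getD_agg (F : PySem.Dict Int Int) (d : PySem.Dict (List String) (PySem.Dict Int Int))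
    (p : List String) (hn : d.keys.Nodup) :
    (pvBagg F d).getD p 0 = pvBval F (d.getD p PySem.Dict.empty) := by
  by_cases hc : d.contains p = true
  · obtain ⟨sub, hmem⟩ : ∃ sub, (p, sub) ∈ d.items := by
      rw [PySem.Dict.contains_iff_mem_keys] at hc
      simpa [PySem.Dict.keys, List.mem_map, Prod.exists] using hc
    rw [PySem.Dict.getD_of_mem_items d hmem hn]
    have hm2 : (p, pvBval F sub) ∈ (pvBagg F d).items := by
      rw [pv_agg_items F d hn]
      exact List.mem_map_of_mem hmem
    exact PySem.Dict.getD_of_mem_items _ hm2 (by rw [pv_keys_agg F d hn]; exact hn) 0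
  · have hc' : d.contains p = false := by simpa using hc
    have hca : (pvBagg F d).contains p = false := by
      have : (pvBagg F d).contains p = d.contains p := by
        simp [PySem.Dict.contains, pv_agg_items F d hn, List.any_map, Function.comp_def]
      rw [this, hc']
    rw [PySem.Dict.getD_of_not_contains d _ hc', PySem.Dict.getD_of_not_contains _ 0 hca]
    rfl

lemma pv_val_sum (F sub : PySem.Dict Int Int) :
    pvBval F sub = (sub.items.map (fun r => r.2 * F.getD r.1 0)).sum := by
  unfold pvBval
  simpa using PySem.List.foldl_add sub.items (fun r => r.2 * F.getD r.1 0) 0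

lemma pv_sum_rep (F : PySem.Dict Int Int) (i c : Int) :
    ∀ (l : List (Int × Int)), (l.map (fun q => q.1)).Nodup → (i, c) ∈ l →
      ((l.map (fun q => if q.1 == i then (i, c + 1) else q)).map (fun r => r.2 * F.getD r.1 0)).sum
        = (l.map (fun r => r.2 * F.getD r.1 0)).sum + F.getD i 0 := by
  intro l
  induction l with
  | nil => intro _ h; simp at h
  | cons q t IH =>
      intro hn hm
      rw [List.map_cons, List.nodup_cons] at hn
      by_cases hqi : q.1 = i
      · have hq : q = (i, c) := by
          rcases List.mem_cons.1 hm with h | h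
          · exact h.symm
          · exact absurd (hqi ▸ List.mem_map.2 ⟨(i, c), h, rfl⟩) hn.1
        have ht : t.map (fun q => if q.1 == i then (i, c + 1) else q) = t := by
          have h2 : ∀ r ∈ t, (if r.1 == i then ((i : Int), c + 1) else r) = r := by
            intro r hr
            have hri : r.1 ≠ i := by
              intro he
              have hmem : r.1 ∈ t.map (fun q => q.1) := List.mem_map.2 ⟨r, hr, rfl⟩
              rw [he, ← hqi] at hmem
              exact hn.1 hmem
            simp [hri]
          calc t.map (fun q => if q.1 == i then ((i : Int), c + 1) else q) = t.map id :=
                List.map_congr_left (by intro r hr; simpa using h2 r hr)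
            _ = t := List.map_id t
        subst hq
        simp only [List.map_cons, List.sum_cons, beq_self_eq_true, if_true, ht]
        ring
      · have hm' : (i, c) ∈ t := by
          rcases List.mem_cons.1 hm with h | h
          · exact absurd (congrArg Prod.fst h.symm) hqi
          · exact h
        have hne : (q.1 == i) = false := by simp [hqi]
        simp only [List.map_cons, List.sum_cons, hne, Bool.false_eq_true, if_false]
        rw [IH hn.2 hm']
        ring

lemma pv_val_modify (F sub : PySem.Dict Int Int) (i : Int) (hn : sub.keys.Nodup) :
    pvBval F (sub.modify i 0 (· + 1)) = pvBval F sub + F.getD i 0 := by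
  show pvBval F (sub.insert i (sub.getD i 0 + 1)) = _
  by_cases hc : sub.contains i = true
  · obtain ⟨c, hmem⟩ : ∃ c, (i, c) ∈ sub.items := by
      rw [PySem.Dict.contains_iff_mem_keys] at hc
      simpa [PySem.Dict.keys, List.mem_map, Prod.exists] using hc
    have hg : sub.getD i 0 = c := PySem.Dict.getD_of_mem_items sub hmem hn 0
    rw [pv_val_sum, pv_val_sum, PySem.Dict.items_insert_of_contains sub _ hc, hg]
    exact pv_sum_rep F i c sub.items (by simpa [PySem.Dict.keys] using hn) hmem
  · have hc' : sub.contains i = false := by simpa using hc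
    rw [pv_val_sum, pv_val_sum, PySem.Dict.items_insert_of_not_contains sub _ hc',
      PySem.Dict.getD_of_not_contains sub 0 hc']
    simp

lemma pv_val_insert_fresh (F sub : PySem.Dict Int Int) (i f : Int)
    (h : ∀ q ∈ sub.items, q.1 ≠ i) :
    pvBval (F.insert i f) sub = pvBval F sub := by
  rw [pv_val_sum, pv_val_sum]
  congr 1
  apply List.map_congr_left
  intro r hr
  rw [PySem.Dict.getD_insert_of_ne F _ _ (h r hr)]

lemma pv_agg_insert_fresh (F : PySem.Dict Int Int) (d : PySem.Dict (List String) (PySem.Dict Int Int))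
    (i f : Int) (h : ∀ ps ∈ d.items, ∀ q ∈ ps.2.items, q.1 ≠ i) :
    pvBagg (F.insert i f) d = pvBagg F d := by
  unfold pvBagg
  apply PySem.List.foldl_congr_mem
  intro s q hq
  rw [pv_val_insert_fresh F q.2 i f (h q hq)]

lemma pv_inner (i freq : Int) (F : PySem.Dict Int Int) (hF : F.getD i 0 = freq) :
    ∀ (cs : List String) (S : PySem.Dict (List String) Int)
      (D : PySem.Dict (List String) (PySem.Dict Int Int)) (prev : String),
      pvInv D (i + 1) → S = pvBagg F D →
      (cs.foldl (pvAinner i freq) ((S, D), prev)).1.1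
          = pvBagg F ((cs.foldl (pvBinner i) (D, prev)).1)
        ∧ (cs.foldl (pvAinner i freq) ((S, D), prev)).1.2 = (cs.foldl (pvBinner i) (D, prev)).1
        ∧ pvInv ((cs.foldl (pvBinner i) (D, prev)).1) (i + 1) := by
  intro cs
  induction cs with
  | nil => intro S D prev hInv hS; exact ⟨hS, rfl, hInv⟩
  | cons c t IH =>
      intro S D prev hInv hS
      simp only [List.foldl_cons, pvAinner, pvBinner]
      have hsub : (D.getD [prev, c] PySem.Dict.empty).keys.Nodup ∧
          ∀ q ∈ (D.getD [prev, c] PySem.Dict.empty).items, q.1 < i + 1 := by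
        by_cases hc : D.contains [prev, c] = true
        · obtain ⟨v, hmem⟩ : ∃ v, ([prev, c], v) ∈ D.items := by
            rw [PySem.Dict.contains_iff_mem_keys] at hc
            simpa [PySem.Dict.keys, List.mem_map, Prod.exists] using hc
          rw [PySem.Dict.getD_of_mem_items D hmem hInv.1]
          exact hInv.2 _ hmem
        · rw [PySem.Dict.getD_of_not_contains D _ (by simpa using hc)]
          constructor
          · exact PySem.Dict.nodup_keys_empty
          · intro q hq; simp [PySem.Dict.empty] at hq
      have hD' : D.modify [prev, c] PySem.Dict.empty (fun sub => sub.modify i 0 (· + 1))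
          = D.insert [prev, c] ((D.getD [prev, c] PySem.Dict.empty).modify i 0 (· + 1)) := rfl
      have hS' : S.modify [prev, c] 0 (· + freq)
          = pvBagg F (D.modify [prev, c] PySem.Dict.empty (fun sub => sub.modify i 0 (· + 1))) := by
        rw [hD', pv_agg_insert F D _ _ hInv.1,
          pv_val_modify F _ i hsub.1]
        show S.insert [prev, c] (S.getD [prev, c] 0 + freq) = _
        rw [hS, pv_getD_agg F D _ hInv.1, hF]
      have hInv' : pvInv (D.modify [prev, c] PySem.Dict.empty (fun sub => sub.modify i 0 (· + 1)))
          (i + 1) := by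
        rw [hD']
        constructor
        · exact PySem.Dict.nodup_keys_insert _ _ _ hInv.1
        · intro ps hps
          rcases (PySem.Dict.mem_items_insert _ _ _ _).1 hps with h | h
          · subst h
            constructor
            · show ((D.getD [prev, c] PySem.Dict.empty).insert i _).keys.Nodup
              exact PySem.Dict.nodup_keys_insert _ _ _ hsub.1
            · intro q hq
              rcases (PySem.Dict.mem_items_insert _ _ _ _).1 hq with h2 | h2
              · subst h2; omega
              · exact hsub.2 q h2.1
          · exact hInv.2 ps h.1
      exact IH _ _ c hInv' hS'

lemma pv_outer : ∀ (vs : List (List String × Int)) (i : Int)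
    (S : PySem.Dict (List String) Int)
    (D : PySem.Dict (List String) (PySem.Dict Int Int)) (F : PySem.Dict Int Int),
    (∀ p ∈ vs, p.1 ≠ []) → pvInv D i → S = pvBagg F D →
    ((PySem.List.enumerate vs i).foldl pvAword (S, D)).1
        = pvBagg (((PySem.List.enumerate vs i).foldl pvBword (D, F)).2)
            (((PySem.List.enumerate vs i).foldl pvBword (D, F)).1)
      ∧ ((PySem.List.enumerate vs i).foldl pvAword (S, D)).2
        = ((PySem.List.enumerate vs i).foldl pvBword (D, F)).1 := by
  intro vs
  induction vs with
  | nil =>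
      intro i S D F _ _ hS
      simp only [PySem.List.enumerate, List.foldl_nil]
      exact ⟨hS, trivial⟩
  | cons wf t IH =>
      intro i S D F hPre hInv hS
      obtain ⟨w0, rest, hw⟩ : ∃ w0 rest, wf.1 = w0 :: rest := by
        cases hwf : wf.1 with
        | nil => exact absurd hwf (hPre wf (List.mem_cons_self))
        | cons a b => exact ⟨a, b, rfl⟩
      have hfresh : ∀ ps ∈ D.items, ∀ q ∈ ps.2.items, q.1 ≠ i := by
        intro ps hps q hq
        have := (hInv.2 ps hps).2 q hq
        omega
      have hInv1 : pvInv D (i + 1) := by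
        refine ⟨hInv.1, fun ps hps => ⟨(hInv.2 ps hps).1, fun q hq => ?_⟩⟩
        have := (hInv.2 ps hps).2 q hq
        omega
      have hS' : S = pvBagg (F.insert i wf.2) D := by
        rw [pv_agg_insert_fresh _ _ _ _ hfresh]; exact hS
      have hF' : (F.insert i wf.2).getD i 0 = wf.2 := PySem.Dict.getD_insert_self F i wf.2 0
      obtain ⟨h1, h2, h3⟩ := pv_inner i wf.2 (F.insert i wf.2) hF' rest S D w0 hInv1 hS'
      simp only [PySem.List.enumerate, List.foldl_cons]
      have hA : pvAword (S, D) (i, wf) =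
          ((rest.foldl (pvAinner i wf.2) ((S, D), w0)).1.1,
           (rest.foldl (pvAinner i wf.2) ((S, D), w0)).1.2) := by
        simp [pvAword, hw]
      have hB : pvBword (D, F) (i, wf) =
          ((rest.foldl (pvBinner i) (D, w0)).1, F.insert i wf.2) := by
        simp [pvBword, hw]
      rw [hA, hB, h1, h2]
      exact IH (i + 1) _ _ _ (fun p hp => hPre p (List.mem_cons_of_mem _ hp)) h3 rfl

-- ===== VERDICT (by name: the statement is the Claim_ definition above) =====
theorem get_pair_statistics_spec : Claim_equal_get_pair_statistics := by
  intro vocab _ hPre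
  unfold Spec_get_pair_statistics get_pair_statistics get_pair_statistics_alt
  obtain ⟨h1, h2⟩ := pv_outer vocab 0 PySem.Dict.empty PySem.Dict.empty PySem.Dict.empty hPre
    ⟨PySem.Dict.nodup_keys_empty, by intro ps hps; simp [PySem.Dict.empty] at hps⟩ rfl
  simp only []
  rw [h1, h2]
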